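-- pv_equiv track=rewrite | github.com/moleece/aoc_23 | 2024/michael/25/solution.py | readLock
-- ===== SOURCE A (Python) =====
-- def readLock(lines):
--     lock = []
--     for i in range(len(lines[0])):
--         for j in range(len(lines)):
--             if lines[j][i] != '#':
--                 lock.append(j-1)
--                 break
--     return tuple(lock)
-- ===== SOURCE B (Python) =====
-- def readLock(lines):
--     width = len(lines[0])
--     heights = [None] * width
--     for j, line in enumerate(lines):
--         for i in range(width):
--             if heights[i] is None and line[i] != '#':
--                 heights[i] = j - 1
--     return tuple(h for h in heights if h is not None)
-- ===== Notes on version B (the rewrite author's own statement) =====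
-- stated objective: alternative
-- what changed: B replaces A's column-major nested scan with break by a single row-major pass that fills a per-column heights array (None = still all '#') and finally filters out columns never closed.
import Mathlib
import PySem

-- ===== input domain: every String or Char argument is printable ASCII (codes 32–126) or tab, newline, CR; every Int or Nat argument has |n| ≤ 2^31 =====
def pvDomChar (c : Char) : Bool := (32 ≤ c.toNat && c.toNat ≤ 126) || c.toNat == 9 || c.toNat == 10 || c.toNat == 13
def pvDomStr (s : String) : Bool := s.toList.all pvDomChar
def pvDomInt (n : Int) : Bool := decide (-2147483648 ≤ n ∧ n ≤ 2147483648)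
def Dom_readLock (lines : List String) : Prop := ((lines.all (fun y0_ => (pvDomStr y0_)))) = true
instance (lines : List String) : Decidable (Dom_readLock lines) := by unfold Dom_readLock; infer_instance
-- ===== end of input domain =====

-- B replaces A's column-major nested scan (break at first non-'#') by a single row-major
-- pass filling a per-column heights array; same cost, different traversal (objective: alternative).

-- lines[j][i] for an in-range j: out of range on i raises IndexError in Python; those inputs
-- are outside Pre_readLock, so the '!' default is never the char the scan actually stops on there.
def pvCharD (line : String) (i : Nat) : Char :=
  (PySem.Str.pyGet? line (Int.ofNat i)).getD '!'

-- ===== PORT A =====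
-- inner 'for j in range(len(lines))' with break, as structural recursion over the rows
def pvScanCol (i : Nat) (j : Int) : List String → List Int
  | [] => []
  | line :: rest => if pvCharD line i ≠ '#' then [j - 1] else pvScanCol i (j + 1) rest

def readLock (lines : List String) : List Int :=
  -- len(lines[0]): lines = [] raises IndexError in Python (outside Pre_readLock)
  (List.range (lines.headD "").toList.length).foldl
    (fun lock i => lock ++ pvScanCol i 0 lines) []

-- ===== PORT B =====
-- one row of B's pass ('for i in range(width)'): set every still-None column whose
-- char in this row is not '#'; recursion over the heights list, i the current index
def pvFill (line : String) (j : Int) (i : Nat) : List (Option Int) → List (Option Int)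
  | [] => []
  | h :: t =>
      (match h with
       | none => if pvCharD line i ≠ '#' then some (j - 1) else none
       | some v => some v) :: pvFill line j (i + 1) t

def pvFillRow (line : String) (j : Int) (heights : List (Option Int)) : List (Option Int) :=
  pvFill line j 0 heights

def readLock_alt (lines : List String) : List Int :=
  let width := (lines.headD "").toList.length
  let final := (PySem.List.enumerate lines 0).foldl
    (fun heights p => pvFillRow p.2 p.1 heights) (List.replicate width none)
  final.filterMap id

-- ===== PRECONDITION & SPEC =====
-- Exactly the inputs on which Python A returns: lines is nonempty and, in every column i,
-- any row reached before the scan breaks (all rows above it are '#' at i) is long enough.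
def Pre_readLock (lines : List String) : Prop :=
  lines ≠ [] ∧ ∀ i < (lines.headD "").toList.length, ∀ j < lines.length,
    (∀ k < j, PySem.Str.pyGet? (lines.getD k "") (Int.ofNat i) = some '#') →
    i < (lines.getD j "").toList.length
instance (lines : List String) : Decidable (Pre_readLock lines) := by unfold Pre_readLock; infer_instance
def pvWitness_readLock : List String := ["##", "#.", ".."]

def Spec_readLock (lines : List String) (out : List Int) : Prop := out = readLock_alt lines
instance (lines : List String) (out : List Int) : Decidable (Spec_readLock lines out) := by unfold Spec_readLock; infer_instance

-- ===== CLAIM (what is proved, stated in full; the proofs are below) =====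
def Claim_equal_readLock : Prop := ∀ (lines : List String), Dom_readLock lines → Pre_readLock lines → Spec_readLock lines (readLock lines)

-- ===== LEMMAS AND PROOFS =====

-- the first row index j whose char at column i is not '#' (None if the whole column is '#')
def pvHit (i : Nat) (j : Int) : List String → Option Int
  | [] => none
  | line :: rest => if pvCharD line i ≠ '#' then some (j - 1) else pvHit i (j + 1) rest

theorem pvScanCol_eq_hit (i : Nat) (j : Int) (rows : List String) :
    pvScanCol i j rows = (pvHit i j rows).toList := by
  induction rows generalizing j with
  | nil => rfl
  | cons line rest ih =>
      simp only [pvScanCol, pvHit]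
      split_ifs with h
      · rfl
      · exact ih (j + 1)

theorem pv_mapIdx_id (l : List (Option Int)) : l.mapIdx (fun _ h => h) = l := by
  induction l with
  | nil => rfl
  | cons a t ih => simp [List.mapIdx_cons, ih]

theorem pvFill_eq_mapIdx (line : String) (j : Int) (heights : List (Option Int)) (i : Nat) :
    pvFill line j i heights
      = heights.mapIdx (fun k h =>
          match h with
          | none => if pvCharD line (i + k) ≠ '#' then some (j - 1) else none
          | some v => some v) := by
  induction heights generalizing i with
  | nil => rfl
  | cons h t ih =>
      simp only [pvFill, List.mapIdx_cons, Nat.add_zero]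
      refine congrArg₂ _ rfl ?_
      rw [ih (i + 1)]
      congr 1
      funext k hh
      have : i + 1 + k = i + (k + 1) := by omega
      rw [this]

theorem pvFold_eq (rows : List String) (j : Int) (heights : List (Option Int)) :
    (PySem.List.enumerate rows j).foldl (fun h p => pvFillRow p.2 p.1 h) heights
      = heights.mapIdx (fun i h => h.or (pvHit i j rows)) := by
  induction rows generalizing j heights with
  | nil =>
      simp only [PySem.List.enumerate_nil, List.foldl_nil, pvHit, Option.or_none]
      exact (pv_mapIdx_id heights).symm
  | cons line rest ih =>
      rw [PySem.List.enumerate_cons]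
      simp only [List.foldl_cons]
      rw [ih (j + 1) (pvFillRow line j heights)]
      unfold pvFillRow
      rw [pvFill_eq_mapIdx, List.mapIdx_mapIdx]
      simp only [Nat.zero_add]
      congr 1
      funext i h
      cases h with
      | some v => simp [pvHit]
      | none =>
          simp only [pvHit, Option.none_or]
          split_ifs with hc <;> simp

theorem pv_mapIdx_replicate (n : Nat) (f : Nat → Option Int → Option Int) :
    (List.replicate n (none : Option Int)).mapIdx f = (List.range n).map (fun i => f i none) := by
  induction n generalizing f with
  | zero => rfl
  | succ m ih =>
      rw [List.replicate_succ, List.mapIdx_cons, List.range_succ_eq_map]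
      simp only [List.map_cons, List.map_map]
      rw [ih]
      simp [Function.comp]

theorem pv_foldl_append (l : List Nat) (f : Nat → List Int) (a : List Int) :
    l.foldl (fun acc i => acc ++ f i) a = a ++ l.flatMap f := by
  induction l generalizing a with
  | nil => simp
  | cons x xs ih => simp [ih, List.append_assoc]

theorem pv_flatMap_toList (l : List Nat) (g : Nat → Option Int) :
    l.flatMap (fun i => (g i).toList) = l.filterMap g := by
  induction l with
  | nil => rfl
  | cons x xs ih =>
      simp only [List.flatMap_cons, List.filterMap_cons, ih]
      cases g x <;> simp

theorem pv_ports_eq (lines : List String) : readLock lines = readLock_alt lines := by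
  simp only [readLock, readLock_alt]
  rw [pvFold_eq lines 0 (List.replicate (lines.headD "").toList.length none)]
  rw [pv_mapIdx_replicate]
  simp only [Option.none_or]
  rw [List.filterMap_map]
  have hA : (fun (lock : List Int) (i : Nat) => lock ++ pvScanCol i 0 lines)
      = fun lock i => lock ++ (pvHit i 0 lines).toList := by
    funext lock i; rw [pvScanCol_eq_hit]
  rw [hA, pv_foldl_append, List.nil_append, pv_flatMap_toList]
  rfl

-- ===== VERDICT (by name: the statement is the Claim_ definition above) =====
theorem readLock_spec : Claim_equal_readLock := by
  intro lines _ _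
  unfold Spec_readLock
  exact pv_ports_eq lines
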